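-- pv_equiv track=rewrite | github.com/n30liberal/phash_utils | remove_dupes.py | find_biggest_file
-- ===== SOURCE A (Python) =====
-- def find_biggest_file(group, premium_files):
--     biggest_file = None
--     for entry in group:
--         if biggest_file is None or entry["file_size"] > biggest_file["file_size"]:
--             biggest_file = entry
--         elif entry["file_size"] == biggest_file["file_size"]:
--             if entry in premium_files:
--                 biggest_file = entry
--     return biggest_file
-- ===== SOURCE B (Python) =====
-- def find_biggest_file(group, premium_files):
--     if not group:
--         return None
--     max_size = max(e["file_size"] for e in group)
--     result = None
--     for e in group:
--         if e["file_size"] == max_size: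
--             if result is None or e in premium_files:
--                 result = e
--     return result
-- ===== Notes on version B (the rewrite author's own statement) =====
-- stated objective: alternative
-- what changed: A's single stateful loop (tracking the current best and re-deciding bigger/tie/premium against it) is replaced by a two-pass decomposition: first compute the maximum file_size, then scan once more keeping the first max-size entry and replacing it with any later max-size premium entry; premium membership is only tested for entries of maximal size.
-- outside the precondition, e.g. on find_biggest_file([{'name': 1}], []): A returns {'name': 1}, B raises KeyError
import Mathlib
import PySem

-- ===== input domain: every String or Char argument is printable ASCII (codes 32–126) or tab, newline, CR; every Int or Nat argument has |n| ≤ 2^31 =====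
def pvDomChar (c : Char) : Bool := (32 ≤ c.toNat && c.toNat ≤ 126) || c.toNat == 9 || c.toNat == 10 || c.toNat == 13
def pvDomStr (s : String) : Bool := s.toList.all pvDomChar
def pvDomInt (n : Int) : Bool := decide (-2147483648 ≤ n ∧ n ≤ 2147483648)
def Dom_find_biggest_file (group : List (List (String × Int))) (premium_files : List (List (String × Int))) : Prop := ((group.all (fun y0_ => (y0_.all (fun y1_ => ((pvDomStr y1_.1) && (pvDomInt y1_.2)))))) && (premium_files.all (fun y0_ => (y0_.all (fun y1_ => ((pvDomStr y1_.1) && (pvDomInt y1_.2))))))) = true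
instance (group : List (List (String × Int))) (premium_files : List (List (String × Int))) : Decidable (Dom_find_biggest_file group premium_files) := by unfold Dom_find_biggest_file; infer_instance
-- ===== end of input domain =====

-- B splits A's single stateful loop into a max-finding pass and a selection pass over only
-- max-size entries (objective: alternative decomposition; same asymptotic cost).

-- Shared semantic helpers (ports of Python's dict indexing and of `dict in list-of-dicts`):
-- entry["file_size"] (Pre_ guarantees the key is present, so the default 0 is never the result)
def pvFsize (e : List (String × Int)) : Int := (PySem.Dict.mk e).getD "file_size" 0
-- Python dict equality (==): same key set and same value at every key (order-insensitive)
def pvDictEq (a b : List (String × Int)) : Bool :=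
  (a.all (fun p => (PySem.Dict.mk b).get? p.1 == (PySem.Dict.mk a).get? p.1)) &&
  (b.all (fun p => (PySem.Dict.mk a).get? p.1 == (PySem.Dict.mk b).get? p.1))
-- `entry in premium_files`
def pvIsPremium (e : List (String × Int)) (prem : List (List (String × Int))) : Bool :=
  prem.any (pvDictEq e)

-- ===== PORT A =====
def find_biggest_file (group : List (List (String × Int))) (premium_files : List (List (String × Int))) : Option (List (String × Int)) :=
  group.foldl (fun biggest entry =>
    match biggest with
    | none => some entry
    | some b =>
      if pvFsize entry > pvFsize b then some entry
      else if pvFsize entry = pvFsize b then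
        (if pvIsPremium entry premium_files then some entry else some b)
      else some b) none

-- ===== PORT B =====
def find_biggest_file_alt (group : List (List (String × Int))) (premium_files : List (List (String × Int))) : Option (List (String × Int)) :=
  match group with
  | [] => none
  | g :: gs =>
    let maxSize := gs.foldl (fun m e => max m (pvFsize e)) (pvFsize g)
    (g :: gs).foldl (fun r e =>
      if pvFsize e = maxSize then
        match r with
        | none => some e
        | some _ => if pvIsPremium e premium_files then some e else r
      else r) none

-- ===== PRECONDITION & SPEC =====
-- Pre_ excludes groups containing an entry without the "file_size" key: on such input B raises
-- KeyError, and A raises KeyError too except when the keyless entry is a lone first entry,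
-- which the short-circuited `is None` branch returns untested.
def Pre_find_biggest_file (group : List (List (String × Int))) (premium_files : List (List (String × Int))) : Prop :=
  ∀ e ∈ group, e.any (fun p => p.1 == "file_size") = true
instance (group : List (List (String × Int))) (premium_files : List (List (String × Int))) : Decidable (Pre_find_biggest_file group premium_files) := by unfold Pre_find_biggest_file; infer_instance
def pvWitness_find_biggest_file : (List (List (String × Int))) × (List (List (String × Int))) :=
  ([[("file_size", 5)], [("file_size", 5), ("x", 1)]], [[("x", 1), ("file_size", 5)]])

def Spec_find_biggest_file (group : List (List (String × Int))) (premium_files : List (List (String × Int))) (out : Option (List (String × Int))) : Prop := out = find_biggest_file_alt group premium_files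
instance (group : List (List (String × Int))) (premium_files : List (List (String × Int))) (out : Option (List (String × Int))) : Decidable (Spec_find_biggest_file group premium_files out) := by unfold Spec_find_biggest_file; infer_instance

-- ===== CLAIM (what is proved, stated in full; the proofs are below) =====
def Claim_equal_find_biggest_file : Prop := ∀ (group : List (List (String × Int))) (premium_files : List (List (String × Int))), Dom_find_biggest_file group premium_files → Pre_find_biggest_file group premium_files → Spec_find_biggest_file group premium_files (find_biggest_file group premium_files)

-- ===== LEMMAS AND PROOFS =====

-- the max-pass init is a lower bound of its result
theorem pv_le_foldl_max (l : List (List (String × Int))) (a : Int) :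
    a ≤ l.foldl (fun m e => max m (pvFsize e)) a := by
  induction l generalizing a with
  | nil => exact le_refl a
  | cons e l ih => exact le_trans (le_max_left a (pvFsize e)) (ih _)

-- core invariant: A's loop continued from `some b` equals B's selection pass continued from
-- `if pvFsize b = M then some b else none`, where M is the running maximum over b :: l.
theorem pv_core (prem : List (List (String × Int))) (l : List (List (String × Int))) (b : List (String × Int)) :
    l.foldl (fun biggest entry =>
      match biggest with
      | none => some entry
      | some b =>
        if pvFsize entry > pvFsize b then some entry
        else if pvFsize entry = pvFsize b then
          (if pvIsPremium entry prem then some entry else some b)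
        else some b) (some b)
    = l.foldl (fun r e =>
        if pvFsize e = l.foldl (fun m e => max m (pvFsize e)) (pvFsize b) then
          match r with
          | none => some e
          | some _ => if pvIsPremium e prem then some e else r
        else r)
        (if pvFsize b = l.foldl (fun m e => max m (pvFsize e)) (pvFsize b) then some b else none) := by
  induction l generalizing b with
  | nil => simp
  | cons e l ih =>
    rcases lt_trichotomy (pvFsize b) (pvFsize e) with hlt | heq | hgt
    · -- entry strictly bigger: A moves to e; b can never equal the max
      have hmax : max (pvFsize b) (pvFsize e) = pvFsize e := max_eq_right (le_of_lt hlt)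
      have hbne : pvFsize b ≠ l.foldl (fun m e => max m (pvFsize e)) (pvFsize e) := by
        have := pv_le_foldl_max l (pvFsize e)
        have h2 : pvFsize b < pvFsize e := hlt
        omega
      simp only [List.foldl_cons, hmax]
      rw [if_pos (by omega : pvFsize e > pvFsize b), ih e]
      congr 1
      rw [if_neg hbne]
    · -- tie: both sides step to e iff premium
      have hmax : max (pvFsize b) (pvFsize e) = pvFsize e := by omega
      simp only [List.foldl_cons, hmax]
      rw [if_neg (by omega : ¬ pvFsize e > pvFsize b), if_pos heq.symm]
      by_cases hp : pvIsPremium e prem = true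
      · rw [if_pos hp, ih e]
        congr 1
        simp only [heq]
        generalize l.foldl (fun m e => max m (pvFsize e)) (pvFsize e) = M
        by_cases he : pvFsize e = M
        · simp [he, hp]
        · simp [he]
      · have ih' := ih b
        simp only [heq] at ih'
        rw [if_neg hp, ih']
        congr 1
        generalize l.foldl (fun m e => max m (pvFsize e)) (pvFsize e) = M
        by_cases he : pvFsize e = M
        · have hb : pvFsize b = M := heq.trans he
          simp [he, hb, hp]
        · have hb : ¬ pvFsize b = M := by rw [heq]; exact he
          simp [he, hb]
    · -- entry strictly smaller: A keeps b; e can never equal the max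
      have hmax : max (pvFsize b) (pvFsize e) = pvFsize b := max_eq_left (le_of_lt hgt)
      have hene : pvFsize e ≠ l.foldl (fun m e => max m (pvFsize e)) (pvFsize b) := by
        have := pv_le_foldl_max l (pvFsize b)
        omega
      simp only [List.foldl_cons, hmax]
      rw [if_neg (by omega : ¬ pvFsize e > pvFsize b), if_neg (by omega : ¬ pvFsize e = pvFsize b),
        ih b]
      congr 1
      rw [if_neg hene]

-- ===== VERDICT (by name: the statement is the Claim_ definition above) =====
theorem find_biggest_file_spec : Claim_equal_find_biggest_file := by
  intro group premium_files _ _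
  unfold Spec_find_biggest_file find_biggest_file find_biggest_file_alt
  match group with
  | [] => rfl
  | g :: gs =>
    simp only [List.foldl_cons]
    rw [pv_core premium_files gs g]
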